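-- pv_equiv track=rewrite | github.com/lmh428724/get-12306-prices | get_all_train.py | transfer_price_list
-- ===== SOURCE A (Python) =====
-- def transfer_price_list(price_list):
--     tmp_info = {'A9': '', 'M': '', 'O': '', 'A6': '', 'A4': '', 'A3': '', 'A2': '', 'A1': '', 'WZ': ''}
--     for k, v in price_list.items():
--         if (tmp_info.__contains__(k)):
--             tmp_info.__setitem__(k, v)
--     result = []
--     for item in tmp_info.values():
--         result.append(item)
--     return result
-- ===== SOURCE B (Python) =====
-- SEAT_KEYS = ('A9', 'M', 'O', 'A6', 'A4', 'A3', 'A2', 'A1', 'WZ')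
--
-- def transfer_price_list(price_list):
--     return [price_list.get(key, '') for key in SEAT_KEYS]
-- ===== Notes on version B (the rewrite author's own statement) =====
-- stated objective: simpler
-- what changed: B replaces A's scan over the whole input dict with a membership filter into a scratch template dict (then a second loop dumping its values) by a single list comprehension over the fixed ordered tuple of the 9 seat keys using dict.get with default '', building the result directly.
import Mathlib
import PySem

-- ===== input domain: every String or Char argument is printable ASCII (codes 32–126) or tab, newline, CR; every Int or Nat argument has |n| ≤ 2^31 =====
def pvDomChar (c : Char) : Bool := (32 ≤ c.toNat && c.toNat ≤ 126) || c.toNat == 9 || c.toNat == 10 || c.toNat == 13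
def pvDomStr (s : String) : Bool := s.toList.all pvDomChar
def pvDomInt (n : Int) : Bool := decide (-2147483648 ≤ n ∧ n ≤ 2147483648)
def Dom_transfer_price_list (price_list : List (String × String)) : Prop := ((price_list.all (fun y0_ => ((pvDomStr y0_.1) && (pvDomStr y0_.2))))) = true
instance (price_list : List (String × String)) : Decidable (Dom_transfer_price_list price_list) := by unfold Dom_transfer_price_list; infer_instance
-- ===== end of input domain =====

-- B replaces A's filter-scan into a scratch template dict by a direct map of dict.get
-- over the fixed ordered 9-key tuple (objective: simpler).

-- ===== PORT A =====
def transfer_price_list (price_list : List (String × String)) : List String :=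
  let tmp_info : PySem.Dict String String :=
    PySem.Dict.ofList [("A9", ""), ("M", ""), ("O", ""), ("A6", ""), ("A4", ""),
                       ("A3", ""), ("A2", ""), ("A1", ""), ("WZ", "")]
  let tmp_info := price_list.foldl
    (fun d kv => if d.contains kv.1 then d.insert kv.1 kv.2 else d) tmp_info
  tmp_info.values.foldl (fun result item => result ++ [item]) []

-- ===== PORT B =====
def pvSeatKeys : List String := ["A9", "M", "O", "A6", "A4", "A3", "A2", "A1", "WZ"]

def transfer_price_list_alt (price_list : List (String × String)) : List String :=
  pvSeatKeys.map (fun key => (PySem.Dict.mk price_list).getD key "")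

-- ===== PRECONDITION & SPEC =====
-- The Python parameter is a dict, which cannot hold duplicate keys; Pre_ restricts the
-- association-list encoding to exactly those lists that encode a dict (keys pairwise distinct).
def Pre_transfer_price_list (price_list : List (String × String)) : Prop :=
  (price_list.map Prod.fst).Nodup
instance (price_list : List (String × String)) : Decidable (Pre_transfer_price_list price_list) := by
  unfold Pre_transfer_price_list; infer_instance
def pvWitness_transfer_price_list : (List (String × String)) := [("M", "10"), ("X", "1")]

def Spec_transfer_price_list (price_list : List (String × String)) (out : List String) : Prop := out = transfer_price_list_alt price_list
instance (price_list : List (String × String)) (out : List String) : Decidable (Spec_transfer_price_list price_list out) := by unfold Spec_transfer_price_list; infer_instance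

-- ===== CLAIM (what is proved, stated in full; the proofs are below) =====
def Claim_equal_transfer_price_list : Prop := ∀ (price_list : List (String × String)), Dom_transfer_price_list price_list → Pre_transfer_price_list price_list → Spec_transfer_price_list price_list (transfer_price_list price_list)

-- ===== LEMMAS AND PROOFS =====

-- A's loop body, named for the lemmas below (identical to the fold in the port).
theorem pv_foldl_append (l acc : List String) :
    l.foldl (fun result item => result ++ [item]) acc = acc ++ l := by
  induction l generalizing acc with
  | nil => simp
  | cons x xs ih => simp [List.foldl, ih, List.append_assoc]

theorem pv_keys_fold (l : List (String × String)) (d : PySem.Dict String String) :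
    (l.foldl (fun d kv => if d.contains kv.1 then d.insert kv.1 kv.2 else d) d).keys = d.keys := by
  induction l generalizing d with
  | nil => rfl
  | cons kv rest ih =>
      simp only [List.foldl]
      rw [ih]
      by_cases h : d.contains kv.1 = true
      · rw [if_pos h, PySem.Dict.keys_insert_of_contains _ _ h]
      · rw [if_neg h]

theorem pv_getD_fold (l : List (String × String)) (hl : (l.map Prod.fst).Nodup)
    (d : PySem.Dict String String) (k : String) (hk : d.contains k = true) :
    (l.foldl (fun d kv => if d.contains kv.1 then d.insert kv.1 kv.2 else d) d).getD k ""
      = ((PySem.Dict.mk l).get? k).getD (d.getD k "") := by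
  induction l generalizing d with
  | nil => rfl
  | cons kv rest ih =>
      obtain ⟨a, v⟩ := kv
      simp only [List.map, List.nodup_cons] at hl
      obtain ⟨ha, hrest⟩ := hl
      simp only [List.foldl]
      by_cases hak : a = k
      · subst hak
        rw [if_pos hk]
        rw [ih hrest _ (by rw [PySem.Dict.contains_insert]; simp)]
        have hnone : (PySem.Dict.mk rest).get? a = none := by
          rw [PySem.Dict.get?_eq_none_iff_not_mem_keys]
          simpa [PySem.Dict.keys] using ha
        rw [hnone, PySem.Dict.get?_mk_cons]
        simp [PySem.Dict.getD_insert_self]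
      · have hne : k ≠ a := fun h => hak h.symm
        rw [PySem.Dict.get?_mk_cons]
        have hstep : ∀ d' : PySem.Dict String String,
            d' = (if d.contains a then d.insert a v else d) →
            d'.getD k "" = d.getD k "" ∧ d'.contains k = d.contains k := by
          intro d' hd'
          by_cases h : d.contains a = true
          · rw [hd', if_pos h]
            exact ⟨PySem.Dict.getD_insert_of_ne _ _ _ hne,
              by rw [PySem.Dict.contains_insert]; simp [hne]⟩
          · rw [hd', if_neg h]; exact ⟨rfl, rfl⟩
        obtain ⟨h1, h2⟩ := hstep _ rfl
        rw [ih hrest _ (by rw [h2]; exact hk), h1, if_neg (by simpa using hak)]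

theorem transfer_price_list_eq (price_list : List (String × String))
    (hp : Pre_transfer_price_list price_list) :
    transfer_price_list price_list = transfer_price_list_alt price_list := by
  unfold transfer_price_list transfer_price_list_alt Pre_transfer_price_list at *
  set tmp0 : PySem.Dict String String :=
    PySem.Dict.ofList [("A9", ""), ("M", ""), ("O", ""), ("A6", ""), ("A4", ""),
                       ("A3", ""), ("A2", ""), ("A1", ""), ("WZ", "")] with htmp0
  set tmp := price_list.foldl
    (fun d kv => if d.contains kv.1 then d.insert kv.1 kv.2 else d) tmp0 with htmp
  rw [pv_foldl_append, List.nil_append]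
  have hkeys : tmp.keys = pvSeatKeys := by
    rw [htmp, pv_keys_fold]; decide
  have hnd : tmp.keys.Nodup := by rw [hkeys]; decide
  rw [PySem.Dict.values_eq_map_keys tmp hnd "", hkeys]
  apply List.map_congr_left
  intro k hk
  rw [htmp]
  have hkc : tmp0.contains k = true := by
    fin_cases hk <;> decide
  have h0 : tmp0.getD k "" = "" := by fin_cases hk <;> decide
  rw [pv_getD_fold price_list hp tmp0 k hkc, h0, PySem.Dict.getD_eq_get?_getD]

-- ===== VERDICT (by name: the statement is the Claim_ definition above) =====
theorem transfer_price_list_spec : Claim_equal_transfer_price_list := by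
  intro price_list _ hp
  unfold Spec_transfer_price_list
  exact transfer_price_list_eq price_list hp
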